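-- pv_equiv track=rewrite | github.com/Schronding/robotito_resolvedor_factorizacion | utils.py | convertir_camino_a_instrucciones
-- ===== SOURCE A (Python) =====
-- def convertir_camino_a_instrucciones(camino):
--     if not camino or len(camino) < 2:
--         return []
--
--     instrucciones = []
--     # Orientación: 0:Arriba, 1:Derecha, 2:Abajo, 3:Izquierda
--     # Asumimos que el robot empieza mirando hacia abajo (Sur)
--     orientacion_actual = 2
--
--     for i in range(len(camino) - 1):
--         actual = camino[i]
--         siguiente = camino[i+1]
--
--         dr, dc = siguiente[0] - actual[0], siguiente[1] - actual[1]
--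
--         if dr == 2: orientacion_objetivo = 2  # Abajo
--         elif dr == -2: orientacion_objetivo = 0 # Arriba
--         elif dc == 2: orientacion_objetivo = 1  # Derecha
--         elif dc == -2: orientacion_objetivo = 3  # Izquierda
--         else: continue
--
--         diff = (orientacion_objetivo - orientacion_actual + 4) % 4
--
--         if diff == 1: # 90 grados a la derecha
--             instrucciones.append('R')
--         elif diff == 3: # 90 grados a la izquierda
--             instrucciones.append('L')
--         elif diff == 2: # 180 grados
--             instrucciones.append('R')
--             instrucciones.append('R')
--
--         instrucciones.append('F')
--         orientacion_actual = orientacion_objetivo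
--
--     return "".join(instrucciones) # Unimos todo en un solo string
-- ===== SOURCE B (Python) =====
-- def convertir_camino_a_instrucciones(camino):
--     if not camino or len(camino) < 2:
--         return []
--     # Pass 1: orientation sequence (start facing South = 2), one entry per valid move.
--     orientaciones = [2]
--     for (r1, c1), (r2, c2) in zip(camino, camino[1:]):
--         dr, dc = r2 - r1, c2 - c1
--         if dr == 2:
--             orientaciones.append(2)
--         elif dr == -2:
--             orientaciones.append(0)
--         elif dc == 2:
--             orientaciones.append(1)
--         elif dc == -2:
--             orientaciones.append(3)
--     # Pass 2: turn table indexed by the orientation difference, then a forward move.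
--     giros = ['', 'R', 'RR', 'L']
--     return ''.join(giros[(b - a) % 4] + 'F'
--                    for a, b in zip(orientaciones, orientaciones[1:]))
-- ===== Notes on version B (the rewrite author's own statement) =====
-- stated objective: alternative
-- what changed: A interleaves direction decoding and turn emission in one stateful loop; B decomposes it into two passes: first build the orientation sequence (start 2, one target per valid move), then map consecutive orientation pairs through a 4-entry turn table ['','R','RR','L'] indexed by (b-a)%4 and join.
-- outside the precondition, e.g. on convertir_camino_a_instrucciones([]): A returns [], B returns []; on convertir_camino_a_instrucciones([(0, 0)]): A returns [], B returns []
import Mathlib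
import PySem

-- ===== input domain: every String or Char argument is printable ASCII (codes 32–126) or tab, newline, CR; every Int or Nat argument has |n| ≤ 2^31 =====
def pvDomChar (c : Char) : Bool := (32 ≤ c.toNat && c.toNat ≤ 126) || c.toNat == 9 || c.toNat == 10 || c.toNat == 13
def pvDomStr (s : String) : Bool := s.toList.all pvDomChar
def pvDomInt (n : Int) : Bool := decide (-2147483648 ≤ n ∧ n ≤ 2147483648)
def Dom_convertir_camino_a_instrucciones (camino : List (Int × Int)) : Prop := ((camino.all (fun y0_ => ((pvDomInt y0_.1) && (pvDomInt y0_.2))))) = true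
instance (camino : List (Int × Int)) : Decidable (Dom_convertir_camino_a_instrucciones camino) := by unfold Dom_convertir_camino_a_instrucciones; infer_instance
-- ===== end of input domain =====

-- B changes the decomposition (orientation sequence pass + turn-table pass) instead of A's
-- single stateful loop; same O(n) cost. Equivalence is about the return value on paths of
-- length ≥ 2 (on shorter paths Python A returns the list [], not a string — excluded by Pre_).

-- ===== PORT A =====
-- A's if/elif/else-continue chain deciding the target orientation of one step
def pvObjetivoA (actual siguiente : Int × Int) : Option Int :=
  let dr := siguiente.1 - actual.1
  let dc := siguiente.2 - actual.2
  if dr = 2 then some 2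
  else if dr = -2 then some 0
  else if dc = 2 then some 1
  else if dc = -2 then some 3
  else none

-- A's diff/append block: the instructions appended for one valid step
def pvPasoA (orientacion_actual orientacion_objetivo : Int) : List String :=
  let diff := PySem.Int.mod (orientacion_objetivo - orientacion_actual + 4) 4
  (if diff = 1 then ["R"]
   else if diff = 3 then ["L"]
   else if diff = 2 then ["R", "R"]
   else []) ++ ["F"]

-- A's loop over consecutive pairs, carrying orientacion_actual
def pvLoopA (orientacion_actual : Int) : List (Int × Int) → List String
  | actual :: siguiente :: resto =>
      match pvObjetivoA actual siguiente with
      | none => pvLoopA orientacion_actual (siguiente :: resto)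
      | some t => pvPasoA orientacion_actual t ++ pvLoopA t (siguiente :: resto)
  | _ => []

def convertir_camino_a_instrucciones (camino : List (Int × Int)) : String :=
  if camino = [] ∨ camino.length < 2 then ""   -- Python returns the LIST []; excluded by Pre_
  else PySem.Str.join "" (pvLoopA 2 camino)

-- ===== PORT B =====
def pvObjetivoB (p q : Int × Int) : Option Int :=
  let dr := q.1 - p.1
  let dc := q.2 - p.2
  if dr = 2 then some 2
  else if dr = -2 then some 0
  else if dc = 2 then some 1
  else if dc = -2 then some 3
  else none

-- pass 1: orientation sequence
def pvOrientacionesB (camino : List (Int × Int)) : List Int :=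
  2 :: (camino.zip camino.tail).filterMap (fun p => pvObjetivoB p.1 p.2)

def pvGirosB : List String := ["", "R", "RR", "L"]

-- pass 2: one composite string per consecutive orientation pair
def pvSegmentosB (os : List Int) : List String :=
  (os.zip os.tail).map (fun p => pvGirosB.getD (PySem.Int.mod (p.2 - p.1) 4).toNat "" ++ "F")

def convertir_camino_a_instrucciones_alt (camino : List (Int × Int)) : String :=
  if camino = [] ∨ camino.length < 2 then ""   -- Python returns the LIST []; excluded by Pre_
  else PySem.Str.join "" (pvSegmentosB (pvOrientacionesB camino))

-- ===== PRECONDITION & SPEC =====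
-- Pre_ excludes paths of length < 2, on which Python A returns the empty LIST [], not a string.
def Pre_convertir_camino_a_instrucciones (camino : List (Int × Int)) : Prop := 2 ≤ camino.length
instance (camino : List (Int × Int)) : Decidable (Pre_convertir_camino_a_instrucciones camino) := by
  unfold Pre_convertir_camino_a_instrucciones; infer_instance

def pvWitness_convertir_camino_a_instrucciones : (List (Int × Int)) := [(0, 0), (2, 0), (2, 2)]

def Spec_convertir_camino_a_instrucciones (camino : List (Int × Int)) (out : String) : Prop := out = convertir_camino_a_instrucciones_alt camino
instance (camino : List (Int × Int)) (out : String) : Decidable (Spec_convertir_camino_a_instrucciones camino out) := by unfold Spec_convertir_camino_a_instrucciones; infer_instance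

-- ===== CLAIM (what is proved, stated in full; the proofs are below) =====
def Claim_equal_convertir_camino_a_instrucciones : Prop := ∀ (camino : List (Int × Int)), Dom_convertir_camino_a_instrucciones camino → Pre_convertir_camino_a_instrucciones camino → Spec_convertir_camino_a_instrucciones camino (convertir_camino_a_instrucciones camino)

-- ===== LEMMAS AND PROOFS =====

theorem pvObjetivo_eq (p q : Int × Int) : pvObjetivoA p q = pvObjetivoB p q := rfl

-- B's pass-1 output, written as the recursion A's loop follows
def pvTargets : List (Int × Int) → List Int
  | a :: b :: rest =>
      match pvObjetivoB a b with
      | none => pvTargets (b :: rest)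
      | some t => t :: pvTargets (b :: rest)
  | _ => []

theorem pvTargets_eq : ∀ (xs : List (Int × Int)),
    (xs.zip xs.tail).filterMap (fun p => pvObjetivoB p.1 p.2) = pvTargets xs := by
  intro xs
  induction xs with
  | nil => rfl
  | cons a tl ih =>
    cases tl with
    | nil => rfl
    | cons b rest =>
      simp only [List.tail_cons] at ih ⊢
      simp only [List.zip_cons_cons, List.filterMap_cons, pvTargets]
      cases pvObjetivoB a b <;> simp [ih]

theorem pvSegmentos_cons (o t : Int) (ts : List Int) :
    pvSegmentosB (o :: t :: ts) =
      (pvGirosB.getD (PySem.Int.mod (t - o) 4).toNat "" ++ "F") :: pvSegmentosB (t :: ts) := by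
  simp [pvSegmentosB]

-- one step: A's appended pieces join to B's composite step string
theorem pvStep_eq (o t : Int) :
    PySem.Str.join "" (pvPasoA o t) =
      pvGirosB.getD (PySem.Int.mod (t - o) 4).toNat "" ++ "F" := by
  have hmod : PySem.Int.mod (t - o + 4) 4 = PySem.Int.mod (t - o) 4 := by
    simp [PySem.Int.mod]
  have hd : PySem.Int.mod (t - o) 4 = 0 ∨ PySem.Int.mod (t - o) 4 = 1 ∨
      PySem.Int.mod (t - o) 4 = 2 ∨ PySem.Int.mod (t - o) 4 = 3 := by
    have h1 := PySem.Int.mod_nonneg (t - o) (b := 4) (by norm_num)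
    have h2 := PySem.Int.mod_lt (t - o) (b := 4) (by norm_num)
    omega
  unfold pvPasoA
  rw [hmod]
  rcases hd with h | h | h | h <;> rw [h] <;> decide

theorem pvIntercalate_nil (xs : List (List Char)) : List.intercalate ([] : List Char) xs = xs.flatten := by
  induction xs with
  | nil => rfl
  | cons a tl ih =>
    cases tl with
    | nil => simp [List.intercalate]
    | cons b r => simp_all [List.intercalate, List.intersperse]

theorem pvJoin_append (l1 l2 : List String) :
    PySem.Str.join "" (l1 ++ l2) = PySem.Str.join "" l1 ++ PySem.Str.join "" l2 := by
  simp [PySem.Str.join, PySem.Chars.join, pvIntercalate_nil, String.ofList_append]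

theorem pvJoin_cons (x : String) (l : List String) :
    PySem.Str.join "" (x :: l) = x ++ PySem.Str.join "" l := by
  simp [PySem.Str.join, PySem.Chars.join, pvIntercalate_nil, String.ofList_append,
    String.ofList_toList]

theorem pvMain : ∀ (xs : List (Int × Int)) (o : Int),
    PySem.Str.join "" (pvLoopA o xs) = PySem.Str.join "" (pvSegmentosB (o :: pvTargets xs)) := by
  intro xs
  induction xs with
  | nil => intro o; rfl
  | cons a tl ih =>
    cases tl with
    | nil => intro o; rfl
    | cons b rest =>
      intro o
      cases h : pvObjetivoB a b with
      | none =>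
        simp only [pvLoopA, pvTargets, pvObjetivo_eq, h]
        exact ih o
      | some t =>
        simp only [pvLoopA, pvTargets, pvObjetivo_eq, h]
        rw [pvJoin_append, pvStep_eq, pvSegmentos_cons, pvJoin_cons, ih t]

-- ===== VERDICT (by name: the statement is the Claim_ definition above) =====
theorem convertir_camino_a_instrucciones_spec : Claim_equal_convertir_camino_a_instrucciones := by
  intro camino _ hpre
  unfold Spec_convertir_camino_a_instrucciones convertir_camino_a_instrucciones
    convertir_camino_a_instrucciones_alt
  unfold Pre_convertir_camino_a_instrucciones at hpre
  have hne : ¬(camino = [] ∨ camino.length < 2) := by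
    rintro (rfl | hc)
    · simp at hpre
    · omega
  rw [if_neg hne, if_neg hne, pvOrientacionesB, pvTargets_eq, pvMain]
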